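-- pv_equiv track=rewrite | github.com/thelaunchengine/ai-messaging-tool | backend-from-ec2/contact_form/form_submitter.py | _check_submission_success
-- ===== SOURCE A (Python) =====
-- def _check_submission_success(response_text: str) -> bool:
--     """Check if HTTP submission was successful"""
--     success_indicators = [
--         'thank you',
--         'success',
--         'submitted',
--         'received',
--         'confirmation',
--         'thank you for your message',
--         'we have received your message',
--         'message sent successfully'
--     ]
--
--     response_lower = response_text.lower()
--     return any(indicator in response_lower for indicator in success_indicators)
-- ===== SOURCE B (Python) =====
-- INDICATORS = ('thank you', 'success', 'submitted', 'received', 'confirmation',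
--               'thank you for your message', 'we have received your message',
--               'message sent successfully')
--
-- def _check_submission_success(response_text: str) -> bool:
--     """Check if HTTP submission was successful"""
--     t = response_text.lower()
--     # single left-to-right scan: does any indicator start at position i?
--     for i in range(len(t)):
--         for ind in INDICATORS:
--             if t.startswith(ind, i):
--                 return True
--     return False
-- ===== Notes on version B (the rewrite author's own statement) =====
-- stated objective: alternative
-- what changed: Replaces eight independent substring searches over the lowered text with one left-to-right scan that tests at each position whether any indicator starts there.
import Mathlib
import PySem

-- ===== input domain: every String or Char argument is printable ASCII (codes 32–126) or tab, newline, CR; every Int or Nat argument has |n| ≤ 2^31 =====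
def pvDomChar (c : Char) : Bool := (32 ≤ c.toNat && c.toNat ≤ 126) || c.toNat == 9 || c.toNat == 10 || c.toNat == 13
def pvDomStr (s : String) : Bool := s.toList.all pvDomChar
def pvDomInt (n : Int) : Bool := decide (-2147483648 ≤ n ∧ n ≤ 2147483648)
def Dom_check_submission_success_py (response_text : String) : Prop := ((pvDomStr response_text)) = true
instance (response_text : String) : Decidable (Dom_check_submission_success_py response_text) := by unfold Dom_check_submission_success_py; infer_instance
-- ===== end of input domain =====

-- B replaces eight independent substring searches with one left-to-right scan testing each position; alternative decomposition, same result.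

-- ===== PORT A =====
def check_submission_success_py (response_text : String) : Bool :=
  let success_indicators : List String :=
    ["thank you", "success", "submitted", "received", "confirmation",
     "thank you for your message", "we have received your message",
     "message sent successfully"]
  let response_lower := PySem.Str.lower response_text
  success_indicators.any (fun indicator => PySem.Str.isIn indicator response_lower)

-- ===== PORT B =====
-- the loop `for i in range(len(t)): tail = t[i:] …` as structural recursion over the suffixes
def pvAltScan (inds : List (List Char)) : List Char → Bool
  | [] => false
  | c :: rest =>
      if inds.any (fun ind => PySem.Chars.startswith (c :: rest) ind) then true
      else pvAltScan inds rest

def check_submission_success_py_alt (response_text : String) : Bool :=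
  let success_indicators : List String :=
    ["thank you", "success", "submitted", "received", "confirmation",
     "thank you for your message", "we have received your message",
     "message sent successfully"]
  let t := PySem.Str.lower response_text
  pvAltScan (success_indicators.map String.toList) t.toList

-- ===== PRECONDITION & SPEC =====
def Spec_check_submission_success_py (response_text : String) (out : Bool) : Prop := out = check_submission_success_py_alt response_text
instance (response_text : String) (out : Bool) : Decidable (Spec_check_submission_success_py response_text out) := by unfold Spec_check_submission_success_py; infer_instance

-- ===== CLAIM (what is proved, stated in full; the proofs are below) =====
def Claim_equal_check_submission_success_py : Prop := ∀ (response_text : String), Dom_check_submission_success_py response_text → Spec_check_submission_success_py response_text (check_submission_success_py response_text)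

-- ===== LEMMAS AND PROOFS =====

theorem pv_any_or {α : Type} (l : List α) (p q : α → Bool) :
    (l.any fun x => p x || q x) = (l.any p || l.any q) := by
  induction l with
  | nil => simp
  | cons a t ih => simp [List.any_cons, ih, Bool.or_assoc, Bool.or_left_comm]

theorem pv_isIn_cons (ind : List Char) (c : Char) (rest : List Char) :
    PySem.Chars.isIn ind (c :: rest)
      = (PySem.Chars.startswith (c :: rest) ind || PySem.Chars.isIn ind rest) := by
  have h1 := PySem.Chars.isIn_iff_infix (sub := ind) (s := c :: rest)
  have h2 := PySem.Chars.isIn_iff_infix (sub := ind) (s := rest)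
  have h3 := PySem.Chars.startswith_iff (s := c :: rest) (p := ind)
  have h4 : ind <:+: c :: rest ↔ ind <+: c :: rest ∨ ind <:+: rest := List.infix_cons_iff
  cases hb : PySem.Chars.isIn ind (c :: rest) <;>
    cases hp : PySem.Chars.startswith (c :: rest) ind <;>
      cases hr : PySem.Chars.isIn ind rest <;> simp_all

theorem pv_altScan_eq (inds : List (List Char)) (h : ∀ ind ∈ inds, ind ≠ []) :
    ∀ s, pvAltScan inds s = inds.any (fun ind => PySem.Chars.isIn ind s) := by
  intro s
  induction s with
  | nil =>
      simp only [pvAltScan]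
      symm
      simp only [List.any_eq_false]
      intro ind hind
      rw [PySem.Chars.isIn_iff_infix]
      intro hinf
      exact h ind hind (List.eq_nil_of_infix_nil hinf)
  | cons c rest ih =>
      simp only [pvAltScan, ih]
      have : (inds.any fun ind => PySem.Chars.isIn ind (c :: rest))
          = (inds.any (fun ind => PySem.Chars.startswith (c :: rest) ind)
             || inds.any (fun ind => PySem.Chars.isIn ind rest)) := by
        rw [← pv_any_or]
        exact congrArg (List.any inds) (funext fun ind => pv_isIn_cons ind c rest)
      rw [this]
      cases inds.any (fun ind => PySem.Chars.startswith (c :: rest) ind) <;> simp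

-- ===== VERDICT (by name: the statement is the Claim_ definition above) =====
theorem check_submission_success_py_spec : Claim_equal_check_submission_success_py := by
  intro response_text _
  unfold Spec_check_submission_success_py
  unfold check_submission_success_py check_submission_success_py_alt
  rw [pv_altScan_eq _ (by decide)]
  simp [PySem.Str.isIn]
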